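-- pv_equiv track=rewrite | github.com/daniel-reich/turbo-robot | CMqa7tAtffudQ7hs4_12.py | sorting_steps
-- ===== SOURCE A (Python) =====
-- def sorting_steps(lst, start=0, end=None):
--   if end is None:
--     end = len(lst)
--     lst =lst[:]
--   if end - start < 2: return []
--   swaps = []
--   pivot = lst[start]
--   pIdx = start
--   for i in range(start + 1, end):
--     if lst[i] < pivot:
--       # swap i, pIdx
--       swaps.append( (i, pIdx) )
--       lst[i], lst[pIdx] = lst[pIdx], lst[i]
--       # swap swap i, pIdx + 1
--       swaps.append((i, pIdx + 1))
--       lst[i], lst[pIdx + 1] = lst[pIdx + 1], lst[i]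
--       pIdx += 1
--   return swaps + sorting_steps(lst, start, pIdx) + sorting_steps(lst, pIdx + 1, end)
-- ===== SOURCE B (Python) =====
-- def sorting_steps(lst, start=0, end=None):
--     """Iterative quicksort-partition step recorder: explicit stack of (start, end)
--     segments instead of recursion; left segment pushed last so it is processed first,
--     reproducing the recursive pre-order swap sequence. Mutates lst in place when end
--     is given, like the original."""
--     if end is None:
--         end = len(lst)
--         lst = lst[:]
--     swaps = []
--     stack = [(start, end)]
--     while stack:
--         s, e = stack.pop()
--         if e - s < 2:
--             continue
--         pivot = lst[s]
--         p = s
--         for i in range(s + 1, e):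
--             if lst[i] < pivot:
--                 swaps.append((i, p))
--                 lst[i], lst[p] = lst[p], lst[i]
--                 swaps.append((i, p + 1))
--                 lst[i], lst[p + 1] = lst[p + 1], lst[i]
--                 p += 1
--         stack.append((p + 1, e))
--         stack.append((s, p))
--     return swaps
-- ===== Notes on version B (the rewrite author's own statement) =====
-- stated objective: alternative
-- what changed: Replaces A's recursion (partition, then two recursive calls whose swap lists are concatenated) by an iterative loop over an explicit stack of (start,end) segments, pushing the right segment before the left and appending swaps to one accumulator in pop order.
import Mathlib
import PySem

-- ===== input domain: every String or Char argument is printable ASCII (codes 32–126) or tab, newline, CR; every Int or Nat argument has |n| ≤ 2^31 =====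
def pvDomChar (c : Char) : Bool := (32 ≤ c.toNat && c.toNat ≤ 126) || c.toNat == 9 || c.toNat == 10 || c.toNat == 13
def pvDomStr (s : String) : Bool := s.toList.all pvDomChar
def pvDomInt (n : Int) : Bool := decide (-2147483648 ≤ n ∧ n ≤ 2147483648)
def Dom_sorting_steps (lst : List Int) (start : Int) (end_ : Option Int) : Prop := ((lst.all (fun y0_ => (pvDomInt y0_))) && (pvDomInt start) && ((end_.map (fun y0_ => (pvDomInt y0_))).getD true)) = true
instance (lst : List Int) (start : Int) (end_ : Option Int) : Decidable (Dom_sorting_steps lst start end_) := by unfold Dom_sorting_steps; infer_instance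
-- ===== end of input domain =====

-- B replaces A's recursion by an explicit stack of (start, end) segments (iterative quicksort):
-- same partition, left segment pushed last so the pre-order swap sequence is identical.
-- Equivalence is about the RETURN value; like A, B mutates lst in place when end is given.
-- (Both ports carry a Nat fuel equal to their termination measure, purely as a totality guard.)

-- Python "lst[i], lst[j] = lst[j], lst[i]" (both reads first, then write i, then write j;
-- negative indices count from the end, exactly as pyGetD/pySetD do on in-range indices).
def pvSwap (xs : List Int) (i j : Int) : List Int :=
  let a := PySem.List.pyGetD xs i 0
  let b := PySem.List.pyGetD xs j 0
  PySem.List.pySetD (PySem.List.pySetD xs i b) j a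

-- loop body of the partition "for i in range(s+1, e)" shared verbatim by A and B
-- (state: swaps so far, current list, pIdx)
def pvStep (pivot : Int) (st : List (Int × Int) × List Int × Int) (i : Int) :
    List (Int × Int) × List Int × Int :=
  if PySem.List.pyGetD st.2.1 i 0 < pivot then
    (st.1 ++ [(i, st.2.2), (i, st.2.2 + 1)],
     pvSwap (pvSwap st.2.1 i st.2.2) i (st.2.2 + 1),
     st.2.2 + 1)
  else st

-- the partition pass: pivot = lst[s], then the loop over range(s+1, e)
def pvPartition (lst : List Int) (s e : Int) : List (Int × Int) × List Int × Int :=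
  (PySem.List.pyRange (s + 1) e 1).foldl (pvStep (PySem.List.pyGetD lst s 0)) ([], lst, s)

-- ===== PORT A =====
-- A's recursion, with the mutated list threaded through; fuel = (e - s).toNat, which
-- strictly exceeds both children's measures, so the 0-fuel base case is never reached
-- on a segment with e - s ≥ 2 (proved by pvLoop_go_spec's induction below).
def sorting_steps_go : Nat → List Int → Int → Int → List (Int × Int) × List Int
  | 0, lst, _, _ => ([], lst)
  | fuel + 1, lst, s, e =>
    if e - s < 2 then ([], lst)
    else
      let P := pvPartition lst s e
      let L := sorting_steps_go fuel P.2.1 s P.2.2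
      let R := sorting_steps_go fuel L.2 (P.2.2 + 1) e
      (P.1 ++ (L.1 ++ R.1), R.2)

def sorting_steps (lst : List Int) (start : Int) (end_ : Option Int) : List (Int × Int) :=
  match end_ with
  | none => (sorting_steps_go ((lst.length : Int) - start).toNat lst start (lst.length : Int)).1
  | some e => (sorting_steps_go (e - start).toNat lst start e).1

-- ===== PORT B =====
-- the while-stack loop of Source B: pop a segment, partition, push right then left;
-- fuel = sum over the stack of 2*(segment size)+1, which decreases by ≥ 1 per iteration.
def pvLoop : Nat → List Int → List (Int × Int) → List (Int × Int) → List (Int × Int)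
  | _, _, [], swaps => swaps
  | 0, _, _ :: _, swaps => swaps
  | fuel + 1, lst, (s, e) :: rest, swaps =>
    if e - s < 2 then pvLoop fuel lst rest swaps
    else
      let P := pvPartition lst s e
      pvLoop fuel P.2.1 ((s, P.2.2) :: (P.2.2 + 1, e) :: rest) (swaps ++ P.1)

def sorting_steps_alt (lst : List Int) (start : Int) (end_ : Option Int) : List (Int × Int) :=
  match end_ with
  | none => pvLoop (2 * ((lst.length : Int) - start).toNat + 1) lst [(start, (lst.length : Int))] []
  | some e => pvLoop (2 * (e - start).toNat + 1) lst [(start, e)] []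

-- ===== PRECONDITION & SPEC =====
-- Pre_ excludes exactly the inputs on which the Python A raises an IndexError
-- (an accessed index falls outside [-len, len)); A returns on every other input.
def Pre_sorting_steps (lst : List Int) (start : Int) (end_ : Option Int) : Prop :=
  let e := end_.getD (lst.length : Int)
  e - start < 2 ∨ (-(lst.length : Int) ≤ start ∧ e ≤ (lst.length : Int))
instance (lst : List Int) (start : Int) (end_ : Option Int) : Decidable (Pre_sorting_steps lst start end_) := by unfold Pre_sorting_steps; infer_instance
def pvWitness_sorting_steps : List Int × Int × Option Int := ([3, 1, 2, 0], 0, none)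

def Spec_sorting_steps (lst : List Int) (start : Int) (end_ : Option Int) (out : List (Int × Int)) : Prop := out = sorting_steps_alt lst start end_
instance (lst : List Int) (start : Int) (end_ : Option Int) (out : List (Int × Int)) : Decidable (Spec_sorting_steps lst start end_ out) := by unfold Spec_sorting_steps; infer_instance

-- ===== CLAIM (what is proved, stated in full; the proofs are below) =====
def Claim_equal_sorting_steps : Prop := ∀ (lst : List Int) (start : Int) (end_ : Option Int), Dom_sorting_steps lst start end_ → Pre_sorting_steps lst start end_ → Spec_sorting_steps lst start end_ (sorting_steps lst start end_)

-- ===== LEMMAS AND PROOFS =====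

-- pIdx moves up by at most one per partition-loop iteration
theorem pvStep_foldl_bounds (pivot : Int) :
    ∀ (is : List Int) (st : List (Int × Int) × List Int × Int),
      st.2.2 ≤ (is.foldl (pvStep pivot) st).2.2 ∧
      (is.foldl (pvStep pivot) st).2.2 ≤ st.2.2 + is.length := by
  intro is
  induction is with
  | nil => intro st; simp
  | cons i is ih =>
    intro st
    have h := ih (pvStep pivot st i)
    have hstep : st.2.2 ≤ (pvStep pivot st i).2.2 ∧ (pvStep pivot st i).2.2 ≤ st.2.2 + 1 := by
      unfold pvStep; split <;> simp
    simp only [List.foldl_cons, List.length_cons]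
    omega

theorem pvPartition_bounds (lst : List Int) (s e : Int) (h : 2 ≤ e - s) :
    s ≤ (pvPartition lst s e).2.2 ∧ (pvPartition lst s e).2.2 < e := by
  unfold pvPartition
  have hb := pvStep_foldl_bounds (PySem.List.pyGetD lst s 0)
      (PySem.List.pyRange (s + 1) e 1) ([], lst, s)
  have hlen : (PySem.List.pyRange (s + 1) e 1).length = (e - (s + 1)).toNat :=
    PySem.List.length_pyRange_one _ _
  simp only [hlen] at hb
  omega

-- the stack's termination measure (proof-side only; B's initial fuel is this of [(start,e)])
def pvMeas (stack : List (Int × Int)) : Nat :=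
  (stack.map (fun f => 2 * (f.2 - f.1).toNat + 1)).sum

theorem pvMeas_nil : pvMeas [] = 0 := rfl

theorem pvMeas_cons (s e : Int) (rest : List (Int × Int)) :
    pvMeas ((s, e) :: rest) = 2 * (e - s).toNat + 1 + pvMeas rest := by
  simp [pvMeas, Nat.add_comm]

-- pvLoop ignores any fuel at or above the stack measure
theorem pvLoop_irrel :
    ∀ (n m : Nat) (lst : List Int) (stack : List (Int × Int)) (acc : List (Int × Int)),
      pvMeas stack ≤ n → pvMeas stack ≤ m → pvLoop n lst stack acc = pvLoop m lst stack acc := by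
  intro n
  induction n with
  | zero =>
    intro m lst stack acc hn _
    cases stack with
    | nil => cases m <;> rfl
    | cons f rest => rw [pvMeas_cons f.1 f.2] at hn; omega
  | succ n ih =>
    intro m lst stack acc hn hm
    cases stack with
    | nil => cases m <;> rfl
    | cons f rest =>
      obtain ⟨s, e⟩ := f
      rw [pvMeas_cons] at hn hm
      cases m with
      | zero => omega
      | succ m =>
        rw [pvLoop, pvLoop]
        by_cases h2 : e - s < 2
        · simp only [if_pos h2]
          exact ih m lst rest acc (by omega) (by omega)
        · simp only [if_neg h2]
          have hb := pvPartition_bounds lst s e (by omega)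
          apply ih <;>
            · rw [pvMeas_cons, pvMeas_cons]; omega

-- Processing the top segment of the stack iteratively emits exactly the swaps and
-- the mutated list that A's recursion computes for that segment.
theorem pvLoop_go_spec :
    ∀ (n : Nat) (s e : Int), (e - s).toNat ≤ n →
      ∀ (m : Nat) (lst : List Int) (rest acc : List (Int × Int)),
        pvMeas ((s, e) :: rest) ≤ m →
        pvLoop m lst ((s, e) :: rest) acc =
          pvLoop m (sorting_steps_go n lst s e).2 rest (acc ++ (sorting_steps_go n lst s e).1) := by
  intro n
  induction n with
  | zero =>
    intro s e hn m lst rest acc hm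
    have h2 : e - s < 2 := by omega
    rw [pvMeas_cons] at hm
    cases m with
    | zero => omega
    | succ m =>
      rw [pvLoop, sorting_steps_go]
      simp only [if_pos h2]
      have := pvLoop_irrel m (m + 1) lst rest acc (by omega) (by omega)
      simpa using this
  | succ n ih =>
    intro s e hn m lst rest acc hm
    rw [pvMeas_cons] at hm
    cases m with
    | zero => omega
    | succ m =>
      rw [pvLoop, sorting_steps_go]
      by_cases h2 : e - s < 2
      · simp only [if_pos h2]
        have := pvLoop_irrel m (m + 1) lst rest acc (by omega) (by omega)
        simpa using this
      · simp only [if_neg h2]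
        have hb := pvPartition_bounds lst s e (by omega)
        rw [ih s (pvPartition lst s e).2.2 (by omega) m _ _ _
            (by rw [pvMeas_cons, pvMeas_cons]; omega)]
        rw [ih ((pvPartition lst s e).2.2 + 1) e (by omega) m _ _ _
            (by rw [pvMeas_cons]; omega)]
        rw [pvLoop_irrel m (m + 1) _ rest _ (by omega) (by omega)]
        simp [List.append_assoc]

theorem ports_agree (lst : List Int) (start : Int) (end_ : Option Int) :
    sorting_steps lst start end_ = sorting_steps_alt lst start end_ := by
  cases end_ with
  | none =>
    simp only [sorting_steps, sorting_steps_alt]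
    rw [pvLoop_go_spec ((lst.length : Int) - start).toNat start (lst.length : Int) le_rfl
        (2 * ((lst.length : Int) - start).toNat + 1) lst [] []
        (by rw [pvMeas_cons, pvMeas_nil])]
    simp [pvLoop]
  | some e =>
    simp only [sorting_steps, sorting_steps_alt]
    rw [pvLoop_go_spec (e - start).toNat start e le_rfl
        (2 * (e - start).toNat + 1) lst [] [] (by rw [pvMeas_cons, pvMeas_nil])]
    simp [pvLoop]

-- ===== VERDICT (by name: the statement is the Claim_ definition above) =====
theorem sorting_steps_spec : Claim_equal_sorting_steps := by
  intro lst start end_ _ _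
  unfold Spec_sorting_steps
  exact ports_agree lst start end_
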